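-- pv_equiv track=rewrite | github.com/awjuliani/dream-jrpg | src/utils/utils.py | create_unique_enemy_names
-- ===== SOURCE A (Python) =====
-- from collections import Counter
--
-- def create_unique_enemy_names(enemy_names):
--     # Count the occurrences of each name
--     name_counts = Counter(enemy_names)
--
--     # Dictionary to keep track of how many of each name we've seen so far
--     seen_counts = {name: 0 for name in name_counts}
--
--     # List to store the unique names
--     unique_names = []
--
--     # Alphabet for suffixes
--     alphabet = "ABCDEFGHIJKLMNOPQRSTUVWXYZ"
--
--     for name in enemy_names:
--         seen_counts[name] += 1
--
--         # If there's only one of this name in total, use the name as is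
--         if name_counts[name] == 1:
--             unique_names.append(name)
--         else:
--             # Otherwise, add a suffix
--             suffix = alphabet[
--                 seen_counts[name] - 1
--             ]  # -1 because we want A for the first duplicate
--             unique_names.append(f"{name} ({suffix})")
--     return unique_names
-- ===== SOURCE B (Python) =====
-- def create_unique_enemy_names(enemy_names):
--     alphabet = "ABCDEFGHIJKLMNOPQRSTUVWXYZ"
--
--     # Group: map each name to the list of indices where it appears.
--     groups = {}
--     for i, name in enumerate(enemy_names):
--         groups.setdefault(name, []).append(i)
--
--     # Scatter: preallocate and fill each slot from its name's group.
--     result = [None] * len(enemy_names)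
--     for name, positions in groups.items():
--         if len(positions) == 1:
--             result[positions[0]] = name
--         else:
--             for k, i in enumerate(positions):
--                 result[i] = f"{name} ({alphabet[k]})"
--     return result
-- ===== Notes on version B (the rewrite author's own statement) =====
-- stated objective: alternative
-- what changed: Replaces A's Counter + running seen-count single pass with a group-then-scatter scheme: build a dict from each name to its list of indices, preallocate the result, and write the bare name or letter-suffixed name directly into each slot.
import Mathlib
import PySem

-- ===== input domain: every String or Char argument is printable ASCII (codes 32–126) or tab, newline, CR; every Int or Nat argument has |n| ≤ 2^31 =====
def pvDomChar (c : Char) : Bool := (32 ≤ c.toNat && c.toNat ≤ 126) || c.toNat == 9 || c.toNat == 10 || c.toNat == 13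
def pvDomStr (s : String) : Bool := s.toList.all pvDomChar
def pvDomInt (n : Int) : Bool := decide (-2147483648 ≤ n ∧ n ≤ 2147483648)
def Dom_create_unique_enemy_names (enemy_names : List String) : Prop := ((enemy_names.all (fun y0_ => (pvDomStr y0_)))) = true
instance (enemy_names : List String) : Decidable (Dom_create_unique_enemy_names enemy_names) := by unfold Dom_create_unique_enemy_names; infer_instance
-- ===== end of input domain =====

-- B replaces A's Counter + running-seen-count single pass by a group-then-scatter scheme
-- (dict name → index list, then fill a preallocated result); alternative decomposition, same cost.


-- ===== PORT A =====
-- loop body of A's 'for name in enemy_names' (state: (seen_counts, unique_names));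
-- 'seen_counts[name] += 1' is modify (name is always a key); 'name_counts[name]' is Counter lookup (getD 0);
-- alphabet[seen_counts[name] - 1] is pyGet? — none (IndexError) only when a name occurs > 26 times, excluded by Pre_, so the '.getD 'A'' default is never the value used.
def pvAStep (name_counts : PySem.Dict String Int)
    (st : PySem.Dict String Int × List String) (name : String) :
    PySem.Dict String Int × List String :=
  let seen := st.1.modify name 0 (· + 1)
  if name_counts.getD name 0 = 1 then
    (seen, st.2 ++ [name])
  else
    (seen, st.2 ++ [name ++ " (" ++
      ((PySem.Str.pyGet? "ABCDEFGHIJKLMNOPQRSTUVWXYZ" (seen.getD name 0 - 1)).getD 'A').toString ++ ")"])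

def create_unique_enemy_names (enemy_names : List String) : List String :=
  let name_counts : PySem.Dict String Int := PySem.Dict.counter enemy_names
  -- seen_counts = {name: 0 for name in name_counts}
  let seen_counts : PySem.Dict String Int :=
    name_counts.keys.foldl (fun d name => d.insert name 0) PySem.Dict.empty
  (enemy_names.foldl (pvAStep name_counts) (seen_counts, [])).2

-- ===== PORT B =====
-- writes one group into the result: result[positions[0]] = name, or result[i] = f"{name} ({alphabet[k]})"
-- for (k, i) in enumerate(positions); indices are ≥ 0 by construction so .toNat is exact,
-- positions is never empty so headD's default is never used; alphabet[k]'s '.getD 'A''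
-- (IndexError for a name occurring > 26 times) is excluded by Pre_ as in port A.
def pvBWriteGroup (res : List String) (item : String × List Int) : List String :=
  let name := item.1
  let positions := item.2
  if positions.length = 1 then
    res.set (positions.headD 0).toNat name
  else
    (PySem.List.enumerate positions).foldl
      (fun res q =>
        res.set q.2.toNat (name ++ " (" ++
          ((PySem.Str.pyGet? "ABCDEFGHIJKLMNOPQRSTUVWXYZ" q.1).getD 'A').toString ++ ")"))
      res

def create_unique_enemy_names_alt (enemy_names : List String) : List String :=
  -- groups.setdefault(name, []).append(i) over enumerate(enemy_names)
  let groups : PySem.Dict String (List Int) :=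
    (PySem.List.enumerate enemy_names).foldl
      (fun d p => d.modify p.2 [] (· ++ [p.1])) PySem.Dict.empty
  -- result = [None] * len(enemy_names); every slot is overwritten, "" is the placeholder
  let result0 : List String := List.replicate enemy_names.length ""
  groups.items.foldl pvBWriteGroup result0

-- ===== PRECONDITION & SPEC =====
-- Pre_ excludes exactly the inputs on which Python A raises IndexError (and Python B does too):
-- some name occurring more than 26 times, so alphabet[seen-1] runs off the 26-letter alphabet.
def Pre_create_unique_enemy_names (enemy_names : List String) : Prop :=
  ∀ s ∈ enemy_names, enemy_names.count s ≤ 26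
instance (enemy_names : List String) : Decidable (Pre_create_unique_enemy_names enemy_names) := by
  unfold Pre_create_unique_enemy_names; infer_instance

def pvWitness_create_unique_enemy_names : List String := ["Goblin", "Goblin", "Slime"]

def Spec_create_unique_enemy_names (enemy_names : List String) (out : List String) : Prop := out = create_unique_enemy_names_alt enemy_names
instance (enemy_names : List String) (out : List String) : Decidable (Spec_create_unique_enemy_names enemy_names out) := by unfold Spec_create_unique_enemy_names; infer_instance

-- ===== CLAIM (what is proved, stated in full; the proofs are below) =====
def Claim_equal_create_unique_enemy_names : Prop := ∀ (enemy_names : List String), Dom_create_unique_enemy_names enemy_names → Pre_create_unique_enemy_names enemy_names → Spec_create_unique_enemy_names enemy_names (create_unique_enemy_names enemy_names)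

-- ===== LEMMAS AND PROOFS =====

-- the value both programs put at slot j
def pvOut (names : List String) (j : Nat) : String :=
  let nm := names.getD j ""
  if (names.count nm : Int) = 1 then nm
  else nm ++ " (" ++
    ((PySem.Str.pyGet? "ABCDEFGHIJKLMNOPQRSTUVWXYZ"
        (((names.take j).count nm : Int) + 1 - 1)).getD 'A').toString ++ ")"

-- indices at which nm occurs (what groups[nm] is)
def pvIdxs (names : List String) (nm : String) : List Int :=
  ((PySem.List.enumerate names).filter (fun p => p.2 == nm)).map (·.1)


lemma seen0_getD (l : List String) (d : PySem.Dict String Int) (k : String)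
    (h : d.getD k 0 = 0) :
    (l.foldl (fun d n => d.insert n 0) d).getD k 0 = 0 := by
  induction l generalizing d with
  | nil => simpa using h
  | cons x t ih =>
    simp only [List.foldl_cons]
    exact ih _ (by rw [PySem.Dict.getD_insert]; split <;> simp [h])

lemma A_loop (nc : PySem.Dict String Int) (l : List String)
    (d : PySem.Dict String Int) (acc : List String) :
    (l.foldl (pvAStep nc) (d, acc)).2 = acc ++ (List.range l.length).map (fun j =>
      let nm := l.getD j ""
      if nc.getD nm 0 = 1 then nm
      else nm ++ " (" ++
        ((PySem.Str.pyGet? "ABCDEFGHIJKLMNOPQRSTUVWXYZ"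
            (d.getD nm 0 + ((l.take j).count nm : Int) + 1 - 1)).getD 'A').toString ++ ")") := by
  induction l generalizing d acc with
  | nil => simp
  | cons x t ih =>
    have hstep : pvAStep nc (d, acc) x =
        (d.modify x 0 (· + 1),
         acc ++ [if nc.getD x 0 = 1 then x
                 else x ++ " (" ++
                   ((PySem.Str.pyGet? "ABCDEFGHIJKLMNOPQRSTUVWXYZ"
                       (d.getD x 0 + 1 - 1)).getD 'A').toString ++ ")"]) := by
      unfold pvAStep
      simp only []
      split <;> simp [PySem.Dict.getD_modify_self]
    simp only [List.foldl_cons, hstep, ih]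
    rw [List.append_assoc]
    congr 1
    rw [List.length_cons, List.range_succ_eq_map, List.map_cons, List.map_map]
    simp only [List.getD_cons_zero, List.take_zero, List.count_nil, List.singleton_append]
    congr 1
    · norm_num
    · apply List.map_congr_left
      intro j hj
      simp only [Function.comp_apply, List.getD_cons_succ, List.take_succ_cons, List.count_cons]
      rw [PySem.Dict.getD_modify]
      by_cases hx : t.getD j "" = x
      · simp only [hx, BEq.rfl, if_true]
        have : d.getD x 0 + 1 + ((t.take j).count x : Int) + 1 - 1 =
            d.getD x 0 + (((t.take j).count x + 1 : Nat) : Int) + 1 - 1 := by push_cast; ring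
        rw [this]
      · rw [if_neg hx]
        have hbx : (x == t.getD j "") = false := by
          simp [beq_eq_false_iff_ne]; exact fun h => hx h.symm
        simp only [hbx, Bool.false_eq_true, if_false, Nat.add_zero]

lemma A_eq (names : List String) :
    create_unique_enemy_names names = (List.range names.length).map (pvOut names) := by
  unfold create_unique_enemy_names
  rw [A_loop]
  simp only [List.nil_append]
  apply List.map_congr_left
  intro j hj
  have h0 : ∀ k : String,
      ((PySem.Dict.counter names).keys.foldl (fun d n => d.insert n 0)
        (PySem.Dict.empty : PySem.Dict String Int)).getD k 0 = 0 :=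
    fun k => seen0_getD _ _ _ (by simp [PySem.Dict.getD_empty])
  unfold pvOut
  simp only [h0, PySem.Dict.getD_counter, zero_add]

lemma groups_getD (names : List String) (nm : String) :
    ((PySem.List.enumerate names).foldl
        (fun d p => d.modify p.2 [] (· ++ [p.1])) PySem.Dict.empty).getD nm [] =
      pvIdxs names nm := by
  have h : (PySem.List.enumerate names).foldl
      (fun d p => d.modify p.2 [] (· ++ [p.1])) PySem.Dict.empty =
      ((PySem.List.enumerate names).map Prod.swap).foldl
        (fun d p => d.modify p.1 [] (· ++ [p.2])) PySem.Dict.empty := by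
    rw [List.foldl_map]
    rfl
  rw [h, PySem.Dict.getD_foldl_modify_append]
  simp [pvIdxs, List.filter_map, List.map_map, Function.comp_def]

lemma len_filter_enumerate (xs : List String) (s : Int) (nm : String) :
    ((PySem.List.enumerate xs s).filter (fun p => p.2 == nm)).length = xs.count nm := by
  induction xs generalizing s with
  | nil => simp [PySem.List.enumerate_nil]
  | cons x t ih =>
    rw [PySem.List.enumerate_cons]
    by_cases hx : x = nm
    · simp [hx, ih]
    · have : (x == nm) = false := by simp [hx]
      simp [this, ih, hx]

lemma mem_idxsAux (xs : List String) (s : Int) (nm : String) (z : Int)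
    (hz : z ∈ ((PySem.List.enumerate xs s).filter (fun p => p.2 == nm)).map (·.1)) :
    ∃ k : Nat, k < xs.length ∧ z = s + k ∧ xs[k]? = some nm := by
  simp only [List.mem_map, List.mem_filter] at hz
  obtain ⟨p, ⟨hp, hpnm⟩, hz⟩ := hz
  rw [PySem.List.mem_enumerate_iff] at hp
  obtain ⟨k, hk, rfl⟩ := hp
  exact ⟨k, hk, hz ▸ rfl, by simp [List.getElem?_eq_getElem hk]; exact (beq_iff_eq.mp hpnm)⟩

lemma mem_pvIdxs (names : List String) (nm : String) (z : Int) (hz : z ∈ pvIdxs names nm) :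
    ∃ k : Nat, k < names.length ∧ z = k ∧ names[k]? = some nm := by
  obtain ⟨k, hk, hzk, hnm⟩ := mem_idxsAux names 0 nm z hz
  exact ⟨k, hk, by omega, hnm⟩

lemma snd_mem_of_mem_enumerate {α : Type} (xs : List α) (s : Int) (q : Int × α)
    (hq : q ∈ PySem.List.enumerate xs s) : q.2 ∈ xs := by
  rw [PySem.List.mem_enumerate_iff] at hq
  obtain ⟨k, hk, rfl⟩ := hq
  exact List.getElem_mem hk

lemma idxs_split (names : List String) (nm : String) (i : Nat) (hi : i < names.length)
    (hnm : names[i] = nm) :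
    ∃ pre post : List Int, pvIdxs names nm = pre ++ (i : Int) :: post ∧
      pre.length = (names.take i).count nm ∧
      (∀ z ∈ pre, 0 ≤ z ∧ z.toNat ≠ i) ∧ (∀ z ∈ post, 0 ≤ z ∧ z.toNat ≠ i) := by
  have hdecomp : names = names.take i ++ names[i] :: names.drop (i + 1) := by
    conv_lhs => rw [← List.take_append_drop i names]
    rw [List.drop_eq_getElem_cons hi]
  refine ⟨((PySem.List.enumerate (names.take i) 0).filter (fun p => p.2 == nm)).map (·.1),
          ((PySem.List.enumerate (names.drop (i+1)) (i+1)).filter (fun p => p.2 == nm)).map (·.1),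
          ?_, ?_, ?_, ?_⟩
  · unfold pvIdxs
    conv_lhs => rw [hdecomp]
    rw [PySem.List.enumerate_append, PySem.List.enumerate_cons]
    have hlen : (names.take i).length = i := List.length_take_of_le (by omega)
    rw [hlen]
    simp only [List.filter_append, List.filter_cons, hnm, beq_self_eq_true, if_true,
      List.map_append, List.map_cons, zero_add]
  · rw [List.length_map, len_filter_enumerate]
  · intro z hz
    obtain ⟨k, hk, hzk, _⟩ := mem_idxsAux _ 0 nm z hz
    have : k < i := by simpa [List.length_take_of_le (le_of_lt hi)] using hk
    omega
  · intro z hz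
    obtain ⟨k, hk, hzk, _⟩ := mem_idxsAux _ ((i:Int)+1) nm z hz
    omega

-- the inner write loop of pvBWriteGroup, with its exact body
lemma foldl_setW_length (name : String) (qs : List (Int × Int)) (res : List String) :
    (qs.foldl (fun res q => res.set q.2.toNat (name ++ " (" ++
        ((PySem.Str.pyGet? "ABCDEFGHIJKLMNOPQRSTUVWXYZ" q.1).getD 'A').toString ++ ")")) res).length
      = res.length := by
  induction qs generalizing res with
  | nil => rfl
  | cons q t ih =>
    simp only [List.foldl_cons]
    rw [ih]
    exact List.length_set

lemma foldl_setW_getD_ne (name : String) (qs : List (Int × Int)) (res : List String) (j : Nat)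
    (h : ∀ q ∈ qs, q.2.toNat ≠ j) :
    (qs.foldl (fun res q => res.set q.2.toNat (name ++ " (" ++
        ((PySem.Str.pyGet? "ABCDEFGHIJKLMNOPQRSTUVWXYZ" q.1).getD 'A').toString ++ ")")) res).getD j ""
      = res.getD j "" := by
  induction qs generalizing res with
  | nil => rfl
  | cons q t ih =>
    simp only [List.foldl_cons]
    rw [ih _ (fun q hq => h q (List.mem_cons_of_mem _ hq))]
    simp [List.getD_eq_getElem?_getD, List.getElem?_set_ne (h q List.mem_cons_self)]

lemma writeGroup_length (res : List String) (item : String × List Int) :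
    (pvBWriteGroup res item).length = res.length := by
  simp only [pvBWriteGroup]
  split
  · simp [List.length_set]
  · exact foldl_setW_length item.1 _ _

lemma length_pvIdxs (names : List String) (nm : String) :
    (pvIdxs names nm).length = names.count nm := by
  unfold pvIdxs
  rw [List.length_map, len_filter_enumerate]


lemma writeGroup_getD (names : List String) (nm : String) (res : List String)
    (hlen : res.length = names.length) (j : Nat) (hj : j < names.length) :
    (pvBWriteGroup res (nm, pvIdxs names nm)).getD j "" =
      if names.getD j "" = nm then pvOut names j else res.getD j "" := by
  have hjD : names.getD j "" = names[j] := by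
    simp [List.getD_eq_getElem?_getD, List.getElem?_eq_getElem hj]
  by_cases hnm : names.getD j "" = nm
  · rw [if_pos hnm]
    have hji : names[j] = nm := by rw [← hjD]; exact hnm
    obtain ⟨pre, post, hsplit, hprelen, hpre, hpost⟩ := idxs_split names nm j hj hji
    have hcnt := length_pvIdxs names nm
    simp only [pvBWriteGroup]
    split
    · rename_i h1
      have hlen1 : pre.length + (post.length + 1) = 1 := by
        have h2 := hsplit ▸ h1
        simpa using h2
      have hpre0 : pre = [] := List.length_eq_zero_iff.mp (by omega)
      have hpost0 : post = [] := List.length_eq_zero_iff.mp (by omega)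
      rw [hpre0, hpost0] at hsplit
      have hc1 : names.count nm = 1 := by rw [← hcnt, hsplit]; rfl
      have hout : pvOut names j = nm := by
        simp only [pvOut]
        rw [hnm, hc1]
        norm_num
      rw [hout, hsplit]
      simp only [List.nil_append, List.headD_cons, Int.toNat_natCast]
      rw [List.getD_eq_getElem?_getD, List.getElem?_set_self (by omega), Option.getD_some]
    · rename_i h1
      have hcne : ¬ ((names.count nm : Int) = 1) := by
        rw [← hcnt]
        intro hx
        apply h1
        exact_mod_cast hx
      rw [hsplit, PySem.List.enumerate_append, PySem.List.enumerate_cons, List.foldl_append,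
        List.foldl_cons]
      rw [foldl_setW_getD_ne _ _ _ _ (fun q hq => (hpost q.2 (snd_mem_of_mem_enumerate _ _ _ hq)).2)]
      simp only [Int.toNat_natCast]
      rw [List.getD_eq_getElem?_getD,
        List.getElem?_set_self (by rw [foldl_setW_length]; omega), Option.getD_some]
      simp only [pvOut]
      rw [hnm, if_neg hcne]
      have harg : ((names.take j).count nm : Int) + 1 - 1 = 0 + (pre.length : Int) := by
        rw [hprelen]; ring
      rw [harg]
  · rw [if_neg hnm]
    have hne : ∀ z ∈ pvIdxs names nm, z.toNat ≠ j := by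
      intro z hz
      obtain ⟨k, hk, rfl, hsome⟩ := mem_pvIdxs names nm z hz
      intro hkj
      rw [Int.toNat_natCast] at hkj
      subst hkj
      apply hnm
      rw [hjD]
      have h2 := List.getElem?_eq_getElem hj ▸ hsome
      exact Option.some_injective _ h2
    simp only [pvBWriteGroup]
    split
    · rename_i h1
      obtain ⟨z, hzz⟩ := List.length_eq_one_iff.mp h1
      rw [hzz]
      simp only [List.headD_cons]
      rw [List.getD_eq_getElem?_getD,
        List.getElem?_set_ne (hne z (by rw [hzz]; exact List.mem_cons_self)),
        ← List.getD_eq_getElem?_getD]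
    · exact foldl_setW_getD_ne _ _ _ _ (fun q hq => hne q.2 (snd_mem_of_mem_enumerate _ _ _ hq))

lemma scatter (names : List String) (L : List String) (hnd : L.Nodup)
    (res : List String) (hlen : res.length = names.length) :
    ((L.map (fun nm => (nm, pvIdxs names nm))).foldl pvBWriteGroup res).length = names.length ∧
    ∀ j, j < names.length →
      ((L.map (fun nm => (nm, pvIdxs names nm))).foldl pvBWriteGroup res).getD j "" =
        if names.getD j "" ∈ L then pvOut names j else res.getD j "" := by
  induction L generalizing res with
  | nil => simpa using hlen
  | cons nm T ih =>
    simp only [List.map_cons, List.foldl_cons]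
    have hlen' : (pvBWriteGroup res (nm, pvIdxs names nm)).length = names.length := by
      rw [writeGroup_length]; exact hlen
    obtain ⟨ihlen, ihget⟩ := ih (List.Nodup.of_cons hnd) _ hlen'
    refine ⟨ihlen, fun j hj => ?_⟩
    rw [ihget j hj, writeGroup_getD names nm res hlen j hj]
    by_cases h1 : names.getD j "" ∈ T
    · rw [if_pos h1, if_pos (List.mem_cons_of_mem _ h1)]
    · rw [if_neg h1]
      by_cases h2 : names.getD j "" = nm
      · rw [if_pos h2, if_pos (by rw [h2]; exact List.mem_cons_self)]
      · rw [if_neg h2, if_neg (by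
          intro hmem
          rcases List.mem_cons.mp hmem with h | h
          · exact h2 h
          · exact h1 h)]

lemma B_eq (names : List String) :
    create_unique_enemy_names_alt names = (List.range names.length).map (pvOut names) := by
  simp only [create_unique_enemy_names_alt]
  have hnodup : ((PySem.List.enumerate names).foldl
      (fun d p => d.modify p.2 [] (· ++ [p.1])) PySem.Dict.empty).keys.Nodup := by
    exact PySem.Dict.nodup_keys_foldl_modify_key (PySem.List.enumerate names)
      (fun (p : Int × String) => p.2) []
      (fun _ (p : Int × String) xs => xs ++ [p.1]) PySem.Dict.empty
      (by simp [PySem.Dict.keys_empty])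
  have hkeys : ((PySem.List.enumerate names).foldl
      (fun d p => d.modify p.2 [] (· ++ [p.1])) PySem.Dict.empty).keys = PySem.Set.ofList names := by
    have h := PySem.Dict.keys_foldl_modify_key (PySem.List.enumerate names)
      (fun (p : Int × String) => p.2) [] (fun _ (p : Int × String) xs => xs ++ [p.1]) PySem.Dict.empty
    simp only [] at h
    rw [h]
    simp [PySem.Dict.keys_empty, PySem.List.map_snd_enumerate]
    rfl
  have hitems : ((PySem.List.enumerate names).foldl
      (fun d p => d.modify p.2 [] (· ++ [p.1])) PySem.Dict.empty).items =
      (PySem.Set.ofList names).map (fun nm => (nm, pvIdxs names nm)) := by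
    rw [PySem.Dict.items_eq_map_keys _ hnodup [], hkeys]
    apply List.map_congr_left
    intro nm _
    rw [groups_getD]
  rw [hitems]
  obtain ⟨hL, hget⟩ := scatter names (PySem.Set.ofList names) (PySem.Set.nodup_ofList names)
    (List.replicate names.length "") (List.length_replicate)
  apply List.ext_getElem
  · rw [hL, List.length_map, List.length_range]
  · intro j hj1 hj2
    have hj : j < names.length := by rwa [hL] at hj1
    have := hget j hj
    rw [if_pos] at this
    · rw [List.getD_eq_getElem?_getD, List.getElem?_eq_getElem hj1, Option.getD_some] at this
      rw [this]
      simp [List.getElem_map, List.getElem_range]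
    · rw [PySem.Set.mem_ofList]
      have : names.getD j "" = names[j] := by
        simp [List.getD_eq_getElem?_getD, List.getElem?_eq_getElem hj]
      rw [this]
      exact List.getElem_mem hj

-- ===== VERDICT (by name: the statement is the Claim_ definition above) =====
theorem create_unique_enemy_names_spec : Claim_equal_create_unique_enemy_names := by
  intro names _ _
  unfold Spec_create_unique_enemy_names
  rw [A_eq, B_eq]
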